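-- pv_equiv track=rewrite | github.com/crasherbe/v3-lottery-generator | predictor.py | score_number
-- ===== SOURCE A (Python) =====
-- def score_number(number, hot, cold):
--
--     score = 0
--
--     for d in number:
--
--         digit = int(d)
--
--         if digit in hot:
--             score += 3
--
--         elif digit in cold:
--             score += 1
--
--         else:
--             score += 2
--
--     return score
-- ===== SOURCE B (Python) =====
-- def score_number(number, hot, cold):
--     digits = [int(d) for d in number]
--     in_hot = sum(1 for d in digits if d in hot)
--     in_cold = sum(1 for d in digits if d not in hot and d in cold)
--     return 2 * len(digits) + in_hot - in_cold
-- ===== Notes on version B (the rewrite author's own statement) =====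
-- stated objective: alternative
-- what changed: Replaces A's accumulator loop with a per-character three-way branch by a branch-free arithmetical formulation: convert once to a digit list, count hot hits and cold-not-hot hits with two comprehensions, and return 2*len + hot_hits - cold_hits.
import Mathlib
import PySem

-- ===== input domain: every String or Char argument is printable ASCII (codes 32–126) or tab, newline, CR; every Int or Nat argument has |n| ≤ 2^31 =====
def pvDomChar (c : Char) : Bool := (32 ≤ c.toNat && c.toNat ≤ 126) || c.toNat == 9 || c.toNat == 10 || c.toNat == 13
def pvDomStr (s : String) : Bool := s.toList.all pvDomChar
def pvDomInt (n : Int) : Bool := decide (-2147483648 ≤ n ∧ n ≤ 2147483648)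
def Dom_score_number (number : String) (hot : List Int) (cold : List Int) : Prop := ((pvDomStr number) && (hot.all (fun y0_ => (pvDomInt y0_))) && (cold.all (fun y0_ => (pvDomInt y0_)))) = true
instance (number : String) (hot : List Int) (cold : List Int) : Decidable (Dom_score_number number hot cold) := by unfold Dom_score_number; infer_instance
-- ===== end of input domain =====

-- B replaces A's per-character branching accumulator by an arithmetical formulation
-- (2*len + hot-count - cold-not-hot-count over a precomputed digit list); same cost, different decomposition.


-- ===== PORT A =====
-- int(d) for a single character d; Pre_score_number guarantees ofChars? is `some`, so getD 0 never fires
def pvInt1 (c : Char) : Int := (PySem.Int.ofChars? [c]).getD 0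

def score_number (number : String) (hot : List Int) (cold : List Int) : Int :=
  number.toList.foldl
    (fun score d =>
      let digit := pvInt1 d
      if digit ∈ hot then score + 3
      else if digit ∈ cold then score + 1
      else score + 2) 0

-- ===== PORT B =====
def score_number_alt (number : String) (hot : List Int) (cold : List Int) : Int :=
  let digits := number.toList.map pvInt1
  let in_hot : Int := digits.countP (fun d => decide (d ∈ hot))
  let in_cold : Int := digits.countP (fun d => decide (d ∉ hot) && decide (d ∈ cold))
  2 * (digits.length : Int) + in_hot - in_cold

-- ===== PRECONDITION & SPEC =====
-- Pre_ excludes exactly the strings containing a non-digit character, on which Python's int(d) raises ValueError.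
def Pre_score_number (number : String) (hot : List Int) (cold : List Int) : Prop :=
  number.toList.all (fun c => c.isDigit) = true
instance (number : String) (hot : List Int) (cold : List Int) : Decidable (Pre_score_number number hot cold) := by unfold Pre_score_number; infer_instance
def pvWitness_score_number : String × List Int × List Int := ("472", [4, 7], [2])

def Spec_score_number (number : String) (hot : List Int) (cold : List Int) (out : Int) : Prop := out = score_number_alt number hot cold
instance (number : String) (hot : List Int) (cold : List Int) (out : Int) : Decidable (Spec_score_number number hot cold out) := by unfold Spec_score_number; infer_instance

-- ===== CLAIM (what is proved, stated in full; the proofs are below) =====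
def Claim_equal_score_number : Prop := ∀ (number : String) (hot : List Int) (cold : List Int), Dom_score_number number hot cold → Pre_score_number number hot cold → Spec_score_number number hot cold (score_number number hot cold)

-- ===== LEMMAS AND PROOFS =====

-- A's fold over digits equals B's arithmetical formulation, for any start value and any digit list.
theorem pv_fold_eq (hot cold : List Int) (cs : List Char) (s : Int) :
    cs.foldl (fun score d =>
        let digit := pvInt1 d
        if digit ∈ hot then score + 3 else if digit ∈ cold then score + 1 else score + 2) s
      = s + 2 * ((cs.map pvInt1).length : Int)
          + ((cs.map pvInt1).countP (fun d => decide (d ∈ hot)) : Int)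
          - ((cs.map pvInt1).countP (fun d => decide (d ∉ hot) && decide (d ∈ cold)) : Int) := by
  induction cs generalizing s with
  | nil => simp
  | cons c cs ih =>
    simp only [List.foldl_cons, List.map_cons, List.countP_cons, List.length_cons]
    by_cases hh : pvInt1 c ∈ hot
    · rw [if_pos hh, ih]; simp [hh]; ring
    · rw [if_neg hh]
      by_cases hc : pvInt1 c ∈ cold
      · rw [if_pos hc, ih]; simp [hh, hc]; ring
      · rw [if_neg hc, ih]; simp [hh, hc]; ring

-- ===== VERDICT (by name: the statement is the Claim_ definition above) =====
theorem score_number_spec : Claim_equal_score_number := by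
  intro number hot cold _ _
  unfold Spec_score_number score_number score_number_alt
  rw [pv_fold_eq]
  simp
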